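-- pv_equiv track=rewrite | github.com/ha2hi/Python | 코딩테스트/프로그래머스/Lv.1/콜라 문제.py | solution
-- ===== SOURCE A (Python) =====
-- def solution(a, b, n):
--     answer = 0
--     while n >= a:
--         remain_coke = n%a
--         return_coke = n//a*b
--         answer += return_coke
--         n = remain_coke + return_coke
--     return answer
-- ===== SOURCE B (Python) =====
-- def solution(a, b, n):
--     if n < a:
--         return 0
--     return (n - b) // (a - b) * b
-- ===== Notes on version B (the rewrite author's own statement) =====
-- stated objective: simpler
-- what changed: Replaced the exchange simulation loop with the closed form (n-b)//(a-b)*b (0 when n < a).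
-- outside the precondition, e.g. on solution(0, 5, 5): A raises ZeroDivisionError, B returns 0; on solution(2, 3, 10): A does not finish within the time limit, B returns -21; on solution(3, -1, 10): A returns -3, B returns -2
import Mathlib
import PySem

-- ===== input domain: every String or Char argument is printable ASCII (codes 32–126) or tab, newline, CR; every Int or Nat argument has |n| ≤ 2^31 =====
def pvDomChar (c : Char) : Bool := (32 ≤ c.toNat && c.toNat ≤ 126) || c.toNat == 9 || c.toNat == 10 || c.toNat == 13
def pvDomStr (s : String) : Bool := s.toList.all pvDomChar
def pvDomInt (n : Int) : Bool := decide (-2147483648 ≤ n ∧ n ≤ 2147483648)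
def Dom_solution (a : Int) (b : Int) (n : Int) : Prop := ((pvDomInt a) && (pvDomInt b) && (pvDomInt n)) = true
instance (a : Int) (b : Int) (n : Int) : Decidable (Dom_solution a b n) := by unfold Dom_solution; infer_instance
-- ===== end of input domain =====

-- B replaces A's exchange-simulation loop by the closed form (n-b)//(a-b)*b (0 when n < a): simpler, no loop.

-- ===== PORT A =====
-- A's while loop, as fuel recursion; under Pre_ the loop runs fewer than n.toNat + 1 times (each
-- iteration strictly decreases n), so the fuel is never exhausted on admitted inputs.
def solutionLoop (a : Int) (b : Int) : Nat → Int → Int → Int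
  | 0, _, answer => answer
  | fuel + 1, n, answer =>
    if a ≤ n then
      let remain_coke := PySem.Int.mod n a
      let return_coke := PySem.Int.floordiv n a * b
      solutionLoop a b fuel (remain_coke + return_coke) (answer + return_coke)
    else answer

def solution (a : Int) (b : Int) (n : Int) : Int :=
  solutionLoop a b (n.toNat + 1) n 0

-- ===== PORT B =====
def solution_alt (a : Int) (b : Int) (n : Int) : Int :=
  if n < a then 0 else PySem.Int.floordiv (n - b) (a - b) * b

-- ===== PRECONDITION & SPEC =====
-- Pre_ restricts to the task's natural domain where A returns: either the loop never runs (n < a),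
-- or the exchange rate is meaningful (a > b ≥ 0); outside it A raises ZeroDivisionError (a = 0),
-- loops forever (b ≥ a ≥ 1 with n ≥ a, or a ≤ 0 ≤ n), or is fed a negative rate outside the task's meaning.
def Pre_solution (a : Int) (b : Int) (n : Int) : Prop :=
  n < a ∨ (1 ≤ a ∧ 0 ≤ b ∧ b < a)
instance (a : Int) (b : Int) (n : Int) : Decidable (Pre_solution a b n) := by
  unfold Pre_solution; infer_instance

def pvWitness_solution : Int × Int × Int := (3, 1, 10)

def Spec_solution (a : Int) (b : Int) (n : Int) (out : Int) : Prop := out = solution_alt a b n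
instance (a : Int) (b : Int) (n : Int) (out : Int) : Decidable (Spec_solution a b n out) := by
  unfold Spec_solution; infer_instance

-- ===== CLAIM (what is proved, stated in full; the proofs are below) =====
def Claim_equal_solution : Prop := ∀ (a : Int) (b : Int) (n : Int), Dom_solution a b n → Pre_solution a b n → Spec_solution a b n (solution a b n)

-- ===== LEMMAS AND PROOFS =====

-- One exchange step preserves the closed form: for n ≥ a, bonus(n) = (n//a)*b + bonus(n%a + (n//a)*b).
lemma solution_alt_step (a b n : Int) (ha : 1 ≤ a) (hb : 0 ≤ b) (hba : b < a) (hn : a ≤ n) :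
    solution_alt a b n
      = PySem.Int.floordiv n a * b
        + solution_alt a b (PySem.Int.mod n a + PySem.Int.floordiv n a * b) := by
  have hqr := PySem.Int.floordiv_mul_add_mod n a
  have hr0 : 0 ≤ PySem.Int.mod n a := PySem.Int.mod_nonneg n (by omega)
  have hra : PySem.Int.mod n a < a := PySem.Int.mod_lt n (by omega)
  have hq1 : 1 ≤ PySem.Int.floordiv n a := by
    rw [PySem.Int.le_floordiv_iff_mul_le (by omega : (0:Int) < a)]; omega
  set q := PySem.Int.floordiv n a with hq
  set r := PySem.Int.mod n a with hr
  have hd : (0:Int) < a - b := by omega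
  have hnb : n - b = (r + q * b - b) + q * (a - b) := by ring_nf; omega
  by_cases hcase : r + q * b < a
  · -- after the exchange the loop stops: the closed form collapses to q*b
    have hb' : b ≤ r + q * b := by nlinarith
    have : PySem.Int.floordiv (n - b) (a - b) = q := by
      rw [PySem.Int.floordiv_eq_iff_of_pos hd]
      constructor <;> nlinarith
    simp [solution_alt, hcase, not_lt.mpr hn, this]
  · -- the loop continues on n' = r + q*b
    have h1 : PySem.Int.floordiv (n - b) (a - b)
        = PySem.Int.floordiv (r + q * b - b) (a - b) + q := by
      rw [PySem.Int.floordiv_eq_ediv_of_pos hd, PySem.Int.floordiv_eq_ediv_of_pos hd,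
        hnb, Int.add_mul_ediv_right _ _ (by omega : a - b ≠ 0)]
    simp only [solution_alt, if_neg (by omega : ¬ n < a),
      if_neg (by omega : ¬ r + q * b < a), h1]
    ring

-- The fuel loop computes the closed form whenever fuel > n (each iteration decreases n by ≥ 1).
lemma solutionLoop_eq (a b : Int) (ha : 1 ≤ a) (hb : 0 ≤ b) (hba : b < a) :
    ∀ (fuel : Nat) (n answer : Int), n < (fuel : Int) →
      solutionLoop a b fuel n answer = answer + solution_alt a b n := by
  intro fuel
  induction fuel with
  | zero =>
      intro n answer hfuel
      simp only [solutionLoop, solution_alt, if_pos (by omega : n < a), add_zero]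
  | succ k ih =>
      intro n answer hfuel
      by_cases hn : a ≤ n
      · have hqr := PySem.Int.floordiv_mul_add_mod n a
        have hr0 : 0 ≤ PySem.Int.mod n a := PySem.Int.mod_nonneg n (by omega)
        have hq1 : 1 ≤ PySem.Int.floordiv n a := by
          rw [PySem.Int.le_floordiv_iff_mul_le (by omega : (0:Int) < a)]; omega
        have hdec : PySem.Int.mod n a + PySem.Int.floordiv n a * b ≤ n - 1 := by
          nlinarith
        simp only [solutionLoop, if_pos hn]
        rw [ih _ _ (by push_cast at hfuel ⊢; omega),
          solution_alt_step a b n ha hb hba hn]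
        ring
      · simp [solutionLoop, hn, solution_alt, lt_of_not_ge hn]

-- ===== VERDICT (by name: the statement is the Claim_ definition above) =====
theorem solution_spec : Claim_equal_solution := by
  intro a b n _ hpre
  unfold Spec_solution solution
  rcases hpre with hna | ⟨ha, hb, hba⟩
  · -- the loop body never runs: both sides are 0
    have : ¬ a ≤ n := by omega
    cases hn : n.toNat + 1 with
    | zero => omega
    | succ k => simp [solutionLoop, this, solution_alt, hna]
  · rw [solutionLoop_eq a b ha hb hba _ n 0 (by omega), zero_add]
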